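-- pv_equiv track=rewrite | github.com/Mr-Rajesh-108/problem_solving_DSA | Problem_of_Day/day_27/Group Balls by Sequence.py | canGroupBalls
-- ===== SOURCE A (Python) =====
-- from collections import Counter
--
-- def canGroupBalls(arr, k):
--     n = len(arr)
--     if n % k != 0:
--         return False
--
--     count = Counter(arr)
--     for num in sorted(count):
--         if count[num] > 0:
--             freq = count[num]
--             # Try forming a group starting from num
--             for i in range(num, num + k):
--                 if count[i] < freq:
--                     return False
--                 count[i] -= freq
--     return True
-- ===== SOURCE B (Python) =====
-- from collections import Counter
--
-- def canGroupBalls(arr, k):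
--     if len(arr) % k != 0:
--         return False
--     count = Counter(arr)
--     keys = sorted(count)
--     p = 0
--     while p < len(keys):
--         m = keys[p]
--         if count[m] == 0:
--             p += 1
--             continue
--         # peel off ONE group [m, m+k) at a time
--         for i in range(m, m + k):
--             if count[i] == 0:
--                 return False
--             count[i] -= 1
--     return True
-- ===== Notes on version B (the rewrite author's own statement) =====
-- stated objective: alternative
-- what changed: B peels balls off one group at a time (decrement-by-1 with a pointer advancing over the sorted distinct keys) instead of A's batch-subtraction of each key's whole remaining frequency across its k-window.
-- outside the precondition, e.g. on canGroupBalls([1, 2], -2): A returns True, B does not finish within the time limit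
import Mathlib
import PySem

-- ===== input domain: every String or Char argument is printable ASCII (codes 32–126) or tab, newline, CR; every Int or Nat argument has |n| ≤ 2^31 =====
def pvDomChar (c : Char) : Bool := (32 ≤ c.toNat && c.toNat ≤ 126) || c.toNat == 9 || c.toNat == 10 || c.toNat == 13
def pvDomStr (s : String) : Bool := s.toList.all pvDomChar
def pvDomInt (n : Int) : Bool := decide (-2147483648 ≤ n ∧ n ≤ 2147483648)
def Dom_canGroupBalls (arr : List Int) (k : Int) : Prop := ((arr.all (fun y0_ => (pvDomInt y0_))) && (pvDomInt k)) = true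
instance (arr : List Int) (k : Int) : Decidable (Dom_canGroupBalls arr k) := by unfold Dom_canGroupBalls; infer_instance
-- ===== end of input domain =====

-- B peels balls off one group at a time with a pointer over the sorted distinct keys, instead of
-- A's batch-subtraction of each key's whole frequency across its window (objective: alternative).

-- ===== PORT A =====
-- inner loop 'for i in range(num, num+k): if count[i] < freq: return False; count[i] -= freq'
def aWindow (freq : Int) : List Int → PySem.Dict Int Int → Option (PySem.Dict Int Int)
  | [], c => some c
  | i :: rest, c =>
      if c.getD i 0 < freq then none
      else aWindow freq rest (c.insert i (c.getD i 0 - freq))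

-- outer loop 'for num in sorted(count): if count[num] > 0: …'
def aKeys (k : Int) : List Int → PySem.Dict Int Int → Bool
  | [], _ => true
  | num :: rest, c =>
      if 0 < c.getD num 0 then
        match aWindow (c.getD num 0) (PySem.List.pyRange num (num + k) 1) c with
        | none => false
        | some c' => aKeys k rest c'
      else aKeys k rest c

def canGroupBalls (arr : List Int) (k : Int) : Bool :=
  if PySem.Int.mod (arr.length : Int) k ≠ 0 then false
  else
    let count := PySem.Dict.counter arr
    aKeys k (PySem.List.sorted count.keys (fun x => x) false) count

-- ===== PORT B =====
-- inner loop 'for i in range(m, m+k): if count[i] == 0: return False; count[i] -= 1'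
def bGroup : List Int → PySem.Dict Int Int → Option (PySem.Dict Int Int)
  | [], c => some c
  | i :: rest, c =>
      if c.getD i 0 == 0 then none
      else bGroup rest (c.insert i (c.getD i 0 - 1))

-- the while-iterations spent at one pointer position m: each successful group lowers count[m] by
-- one (k ≥ 1), so count[m] at arrival bounds the number of iterations and serves as structural fuel
def bPeel (m k : Int) : Nat → PySem.Dict Int Int → Option (PySem.Dict Int Int)
  | 0, c => some c
  | fuel + 1, c =>
      if c.getD m 0 == 0 then some c
      else
        match bGroup (PySem.List.pyRange m (m + k) 1) c with
        | none => none
        | some c' => bPeel m k fuel c'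

-- the while loop: the pointer p advances exactly when count[keys[p]] == 0
def bKeys (k : Int) : List Int → PySem.Dict Int Int → Bool
  | [], _ => true
  | m :: rest, c =>
      match bPeel m k (c.getD m 0).toNat c with
      | none => false
      | some c' => bKeys k rest c'

def canGroupBalls_alt (arr : List Int) (k : Int) : Bool :=
  if PySem.Int.mod (arr.length : Int) k ≠ 0 then false
  else
    let count := PySem.Dict.counter arr
    bKeys k (PySem.List.sorted count.keys (fun x => x) false) count

-- ===== PRECONDITION & SPEC =====
-- Pre_ excludes k = 0, where A raises ZeroDivisionError, and negative k with len(arr) % k == 0,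
-- where A's empty inner ranges yield an accidental True while B's peeling loop does not terminate.
def Pre_canGroupBalls (arr : List Int) (k : Int) : Prop :=
  1 ≤ k ∨ (k ≤ -1 ∧ PySem.Int.mod (arr.length : Int) k ≠ 0)
instance (arr : List Int) (k : Int) : Decidable (Pre_canGroupBalls arr k) := by unfold Pre_canGroupBalls; infer_instance

def pvWitness_canGroupBalls : List Int × Int := ([1, 2, 1, 2], 2)

def Spec_canGroupBalls (arr : List Int) (k : Int) (out : Bool) : Prop := out = canGroupBalls_alt arr k
instance (arr : List Int) (k : Int) (out : Bool) : Decidable (Spec_canGroupBalls arr k out) := by unfold Spec_canGroupBalls; infer_instance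

-- ===== CLAIM (what is proved, stated in full; the proofs are below) =====
def Claim_equal_canGroupBalls : Prop := ∀ (arr : List Int) (k : Int), Dom_canGroupBalls arr k → Pre_canGroupBalls arr k → Spec_canGroupBalls arr k (canGroupBalls arr k)

-- ===== LEMMAS AND PROOFS =====

-- A's inner loop fails iff some slot of the window is below freq; on success every slot of the
-- window drops by freq (reads at the current slot are unaffected by earlier inserts: ws is Nodup)
lemma aWindow_spec (freq : Int) : ∀ (ws : List Int), ws.Nodup → ∀ (c : PySem.Dict Int Int),
    (aWindow freq ws c = none ↔ ∃ i ∈ ws, c.getD i 0 < freq) ∧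
    (∀ c', aWindow freq ws c = some c' →
      ∀ j, c'.getD j 0 = c.getD j 0 - (if j ∈ ws then freq else 0)) := by
  intro ws
  induction ws with
  | nil => intro _ c; simp [aWindow]
  | cons i rest ih =>
    intro hnd c
    have hnr : rest.Nodup := hnd.of_cons
    have hir : i ∉ rest := (List.nodup_cons.mp hnd).1
    by_cases hlt : c.getD i 0 < freq
    · constructor
      · simp [aWindow, hlt]
      · intro c' hc'; simp [aWindow, hlt] at hc'
    · have hstep : aWindow freq (i :: rest) c
          = aWindow freq rest (c.insert i (c.getD i 0 - freq)) := by
        simp [aWindow, hlt]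
      have hget : ∀ j, (c.insert i (c.getD i 0 - freq)).getD j 0
          = if j = i then c.getD i 0 - freq else c.getD j 0 := by
        intro j
        by_cases hji : j = i
        · subst hji; simp [PySem.Dict.getD_insert_self]
        · rw [PySem.Dict.getD_insert_of_ne c _ _ hji, if_neg hji]
      obtain ⟨ihn, ihs⟩ := ih hnr (c.insert i (c.getD i 0 - freq))
      constructor
      · rw [hstep, ihn]
        constructor
        · rintro ⟨i', hi', hlt'⟩
          have hne : i' ≠ i := fun h => hir (h ▸ hi')
          rw [hget i', if_neg hne] at hlt'
          exact ⟨i', List.mem_cons_of_mem _ hi', hlt'⟩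
        · rintro ⟨i', hi', hlt'⟩
          rcases List.mem_cons.mp hi' with h | h
          · exact absurd (h ▸ hlt') hlt
          · have hne : i' ≠ i := fun he => hir (he ▸ h)
            exact ⟨i', h, by rw [hget i', if_neg hne]; exact hlt'⟩
      · intro c' hc' j
        rw [hstep] at hc'
        rw [ihs c' hc' j, hget j]
        by_cases hji : j = i
        · subst hji; simp [hir]
        · simp [hji]

-- B's inner loop fails iff some slot of the window is empty; on success every slot drops by one
lemma bGroup_spec : ∀ (ws : List Int), ws.Nodup → ∀ (c : PySem.Dict Int Int),
    (bGroup ws c = none ↔ ∃ i ∈ ws, c.getD i 0 = 0) ∧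
    (∀ c', bGroup ws c = some c' →
      ∀ j, c'.getD j 0 = c.getD j 0 - (if j ∈ ws then 1 else 0)) := by
  intro ws
  induction ws with
  | nil => intro _ c; simp [bGroup]
  | cons i rest ih =>
    intro hnd c
    have hnr : rest.Nodup := hnd.of_cons
    have hir : i ∉ rest := (List.nodup_cons.mp hnd).1
    by_cases hz : c.getD i 0 = 0
    · constructor
      · simp [bGroup, hz]
      · intro c' hc'; simp [bGroup, hz] at hc'
    · have hstep : bGroup (i :: rest) c
          = bGroup rest (c.insert i (c.getD i 0 - 1)) := by
        simp [bGroup, hz]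
      have hget : ∀ j, (c.insert i (c.getD i 0 - 1)).getD j 0
          = if j = i then c.getD i 0 - 1 else c.getD j 0 := by
        intro j
        by_cases hji : j = i
        · subst hji; simp [PySem.Dict.getD_insert_self]
        · rw [PySem.Dict.getD_insert_of_ne c _ _ hji, if_neg hji]
      obtain ⟨ihn, ihs⟩ := ih hnr (c.insert i (c.getD i 0 - 1))
      constructor
      · rw [hstep, ihn]
        constructor
        · rintro ⟨i', hi', hz'⟩
          have hne : i' ≠ i := fun h => hir (h ▸ hi')
          rw [hget i', if_neg hne] at hz'
          exact ⟨i', List.mem_cons_of_mem _ hi', hz'⟩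
        · rintro ⟨i', hi', hz'⟩
          rcases List.mem_cons.mp hi' with h | h
          · exact absurd (h ▸ hz') hz
          · have hne : i' ≠ i := fun he => hir (he ▸ h)
            exact ⟨i', h, by rw [hget i', if_neg hne]; exact hz'⟩
      · intro c' hc' j
        rw [hstep] at hc'
        rw [ihs c' hc' j, hget j]
        by_cases hji : j = i
        · subst hji; simp [hir]
        · simp [hji]

-- f one-at-a-time peels from m behave exactly like one batch subtraction of f across the window:
-- they fail iff some slot of the window is below f, and on success every slot drops by f
lemma bPeel_spec (m k : Int) (hk : 1 ≤ k) : ∀ (f : Nat) (c : PySem.Dict Int Int),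
    c.getD m 0 = (f : Int) →
    (∀ i ∈ PySem.List.pyRange m (m + k) 1, 0 ≤ c.getD i 0) →
    ((bPeel m k f c = none ↔ ∃ i ∈ PySem.List.pyRange m (m + k) 1, c.getD i 0 < (f : Int)) ∧
     (∀ c', bPeel m k f c = some c' →
       ∀ j, c'.getD j 0 = c.getD j 0 - (if j ∈ PySem.List.pyRange m (m + k) 1 then (f : Int) else 0))) := by
  have hnd : (PySem.List.pyRange m (m + k) 1).Nodup := PySem.List.nodup_pyRange_one m (m + k)
  intro f
  induction f with
  | zero =>
    intro c _ hpos
    refine ⟨?_, ?_⟩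
    · simp only [bPeel]
      constructor
      · intro h; exact absurd h (by simp)
      · rintro ⟨i, hi, hlt⟩; exact absurd (hpos i hi) (by omega)
    · intro c' hc' j
      simp only [bPeel, Option.some.injEq] at hc'
      subst hc'
      simp
  | succ f ihf =>
    intro c hcm hpos
    have hmne : ¬ (c.getD m 0 = 0) := by rw [hcm]; omega
    have hstep0 : bPeel m k (f + 1) c
        = match bGroup (PySem.List.pyRange m (m + k) 1) c with
          | none => none
          | some c' => bPeel m k f c' := by
      simp [bPeel, hmne]
    cases hbg : bGroup (PySem.List.pyRange m (m + k) 1) c with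
    | none =>
      obtain ⟨i, hi, hz⟩ := ((bGroup_spec _ hnd c).1).mp hbg
      refine ⟨?_, ?_⟩
      · rw [hstep0, hbg]
        simp only [true_iff]
        exact ⟨i, hi, by rw [hz]; exact_mod_cast Nat.succ_pos f⟩
      · intro c' hc'; rw [hstep0, hbg] at hc'; exact absurd hc' (by simp)
    | some c1 =>
      have hm : m ∈ PySem.List.pyRange m (m + k) 1 :=
        PySem.List.mem_pyRange_one.mpr ⟨le_refl m, by omega⟩
      have hne0 : ∀ i ∈ PySem.List.pyRange m (m + k) 1, ¬ c.getD i 0 = 0 := by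
        intro i hi hz
        exact (by rw [hbg]; simp : ¬ bGroup (PySem.List.pyRange m (m + k) 1) c = none)
          (((bGroup_spec _ hnd c).1).mpr ⟨i, hi, hz⟩)
      have hchar := (bGroup_spec _ hnd c).2 c1 hbg
      have hc1m : c1.getD m 0 = (f : Int) := by
        rw [hchar m, if_pos hm, hcm]; push_cast; ring
      have hc1pos : ∀ i ∈ PySem.List.pyRange m (m + k) 1, 0 ≤ c1.getD i 0 := by
        intro i hi
        rw [hchar i, if_pos hi]
        have := hpos i hi
        have := hne0 i hi
        omega
      obtain ⟨ihn, ihs⟩ := ihf c1 hc1m hc1pos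
      have hstep : bPeel m k (f + 1) c = bPeel m k f c1 := by rw [hstep0, hbg]
      refine ⟨?_, ?_⟩
      · rw [hstep, ihn]
        constructor
        · rintro ⟨i, hi, hlt⟩
          rw [hchar i, if_pos hi] at hlt
          exact ⟨i, hi, by push_cast; omega⟩
        · rintro ⟨i, hi, hlt⟩
          refine ⟨i, hi, ?_⟩
          rw [hchar i, if_pos hi]
          have := hne0 i hi
          have := hpos i hi
          push_cast at hlt ⊢
          omega
      · intro c' hc' j
        rw [hstep] at hc'
        rw [ihs c' hc' j, hchar j]
        by_cases hj : j ∈ PySem.List.pyRange m (m + k) 1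
        · rw [if_pos hj, if_pos hj, if_pos hj]; push_cast; ring
        · rw [if_neg hj, if_neg hj, if_neg hj]; ring

-- key-by-key simulation: A's batch step at a key and B's run of peels there produce extensionally
-- equal, nonnegative count states, and fail in exactly the same cases
lemma keys_sim (k : Int) (hk : 1 ≤ k) : ∀ (S : List Int) (cA cB : PySem.Dict Int Int),
    (∀ j, cA.getD j 0 = cB.getD j 0) → (∀ j, 0 ≤ cA.getD j 0) →
    aKeys k S cA = bKeys k S cB := by
  intro S
  induction S with
  | nil => intro cA cB _ _; rfl
  | cons m rest ih =>
    intro cA cB hext hpos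
    have hnd : (PySem.List.pyRange m (m + k) 1).Nodup := PySem.List.nodup_pyRange_one m (m + k)
    have hBm : cB.getD m 0 = cA.getD m 0 := (hext m).symm
    by_cases hv : 0 < cA.getD m 0
    · -- at least one group is started at m
      have hBnn : 0 ≤ cB.getD m 0 := hBm ▸ hpos m
      have hf : cB.getD m 0 = (((cB.getD m 0).toNat : Nat) : Int) := (Int.toNat_of_nonneg hBnn).symm
      have hposB : ∀ i ∈ PySem.List.pyRange m (m + k) 1, 0 ≤ cB.getD i 0 := by
        intro i _; rw [← hext i]; exact hpos i
      obtain ⟨pn, ps⟩ := bPeel_spec m k hk (cB.getD m 0).toNat cB hf hposB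
      obtain ⟨an, as⟩ := aWindow_spec (cA.getD m 0) _ hnd cA
      have hfreq : ((((cB.getD m 0).toNat : Nat)) : Int) = cA.getD m 0 := by
        rw [← hf, hBm]
      cases haw : aWindow (cA.getD m 0) (PySem.List.pyRange m (m + k) 1) cA with
      | none =>
        obtain ⟨i, hi, hlt⟩ := an.mp haw
        have hbp : bPeel m k (cB.getD m 0).toNat cB = none := by
          refine pn.mpr ⟨i, hi, ?_⟩
          rw [← hext i, hfreq]
          exact hlt
        simp only [aKeys, bKeys, if_pos hv, haw, hbp]
      | some cA' =>
        have hnofail : ¬ ∃ i ∈ PySem.List.pyRange m (m + k) 1, cA.getD i 0 < cA.getD m 0 := by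
          rw [← an, haw]; simp
        cases hbp : bPeel m k (cB.getD m 0).toNat cB with
        | none =>
          obtain ⟨i, hi, hlt⟩ := pn.mp hbp
          exact absurd ⟨i, hi, by rw [hext i, ← hfreq]; exact hlt⟩ hnofail
        | some cB' =>
          have hext' : ∀ j, cA'.getD j 0 = cB'.getD j 0 := by
            intro j
            rw [as cA' haw j, ps cB' hbp j, hext j, hfreq]
          have hpos' : ∀ j, 0 ≤ cA'.getD j 0 := by
            intro j
            rw [as cA' haw j]
            by_cases hj : j ∈ PySem.List.pyRange m (m + k) 1
            · rw [if_pos hj]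
              have : ¬ cA.getD j 0 < cA.getD m 0 := fun h => hnofail ⟨j, hj, h⟩
              omega
            · rw [if_neg hj]
              have := hpos j
              omega
          simp only [aKeys, bKeys, if_pos hv, haw, hbp]
          exact ih cA' cB' hext' hpos'
    · -- count[m] is 0 here: A skips the key, B's peel loop runs zero times
      have h0 : cA.getD m 0 = 0 := le_antisymm (by omega) (hpos m)
      have ht : (cB.getD m 0).toNat = 0 := by rw [hBm, h0]; rfl
      simp only [aKeys, bKeys, if_neg hv, ht, bPeel]
      exact ih cA cB hext hpos

-- ===== VERDICT (by name: the statement is the Claim_ definition above) =====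
theorem canGroupBalls_spec : Claim_equal_canGroupBalls := by
  intro arr k _ hk
  unfold Spec_canGroupBalls canGroupBalls canGroupBalls_alt
  by_cases hmod : PySem.Int.mod (arr.length : Int) k ≠ 0
  · simp [hmod]
  · rw [if_neg hmod, if_neg hmod]
    have hk1 : 1 ≤ k := by
      rcases hk with h | ⟨_, hne⟩
      · exact h
      · exact absurd hne (by simpa using hmod)
    exact keys_sim k hk1 _ _ _ (fun j => rfl) (fun j => by
      simp [PySem.Dict.getD_counter])
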